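-- pv_equiv track=rewrite | github.com/ffyuanda/15112-homework | homework/src/isnthKobieNumber.py | isKobieNumber
-- ===== SOURCE A (Python) =====
-- def isKobieNumber(n):
--     lastDigit,nextDigit,digit = 0,0,0
--     num = 0
--     place = 0
--     fiveCount = 0
--     is112 = False
--     nextToOne = False
--
--     while(n > 0):
--
--         digit = n % 10
--         num += digit * 10 ** place
--         n //= 10
--         nextDigit = n % 10
--         if (digit == 5):
--             fiveCount += 1
--             if nextDigit == 1 or lastDigit == 1:
--                 nextToOne = True
--         if(n == 112 or num == 112):
--             is112 = True
--         lastDigit = digit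
--
--         place += 1
--     return nextToOne and fiveCount == 1 and is112
-- ===== SOURCE B (Python) =====
-- def isKobieNumber(n):
--     if n <= 0:
--         return False
--     s = str(n)
--     return (('15' in s or '51' in s)
--             and s.count('5') == 1
--             and (s.startswith('112') or s.endswith('112')))
-- ===== Notes on version B (the rewrite author's own statement) =====
-- stated objective: simpler
-- what changed: A's single stateful while-loop over digits (carrying lastDigit, a rebuilt low-part number, a place counter and three flags) is replaced by three independent tests on str(n): '15' or '51' occurs as a substring, '5' occurs exactly once, and the string starts or ends with '112'.
import Mathlib
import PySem

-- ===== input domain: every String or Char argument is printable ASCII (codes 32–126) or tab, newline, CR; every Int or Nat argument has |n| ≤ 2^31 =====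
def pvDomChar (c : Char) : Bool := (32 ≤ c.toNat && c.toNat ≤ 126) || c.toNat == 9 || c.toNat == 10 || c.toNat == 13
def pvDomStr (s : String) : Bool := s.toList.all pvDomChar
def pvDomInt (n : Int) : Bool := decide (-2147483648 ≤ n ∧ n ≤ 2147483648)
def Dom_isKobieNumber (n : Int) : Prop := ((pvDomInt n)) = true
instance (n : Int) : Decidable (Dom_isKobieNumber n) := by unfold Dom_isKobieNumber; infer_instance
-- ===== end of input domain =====

-- B re-states A's digit-by-digit while-loop as three plain substring/count tests on str(n); same return value, simpler decomposition (no speed claim).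

-- ===== PORT A =====
-- A's while-loop, as a recursive function over the loop state
-- (nextDigit and digit are recomputed each iteration, so they are not carried state).
def isKobieLoop (n lastDigit num : Int) (place : Nat) (fiveCount : Int) (is112 nextToOne : Bool) : Bool :=
  if h : 0 < n then
    let digit := PySem.Int.mod n 10
    let num' := num + digit * 10 ^ place
    let n' := PySem.Int.floordiv n 10
    let nextDigit := PySem.Int.mod n' 10
    let fiveCount' := if digit = 5 then fiveCount + 1 else fiveCount
    let nextToOne' := if digit = 5 ∧ (nextDigit = 1 ∨ lastDigit = 1) then true else nextToOne
    let is112' := if n' = 112 ∨ num' = 112 then true else is112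
    isKobieLoop n' digit num' (place + 1) fiveCount' is112' nextToOne'
  else
    nextToOne && fiveCount == 1 && is112
termination_by n.toNat
decreasing_by
  simp only [PySem.Int.floordiv, Int.fdiv_eq_ediv]
  omega

def isKobieNumber (n : Int) : Bool := isKobieLoop n 0 0 0 0 false false

-- ===== PORT B =====
def isKobieNumber_alt (n : Int) : Bool :=
  if n ≤ 0 then false
  else
    let s := PySem.Int.toStr n
    (PySem.Str.isIn "15" s || PySem.Str.isIn "51" s)
      && (PySem.Str.count s "5" == 1)
      && (PySem.Str.startswith s "112" || PySem.Str.endswith s "112")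

-- ===== PRECONDITION & SPEC =====
def Spec_isKobieNumber (n : Int) (out : Bool) : Prop := out = isKobieNumber_alt n
instance (n : Int) (out : Bool) : Decidable (Spec_isKobieNumber n out) := by unfold Spec_isKobieNumber; infer_instance

-- ===== CLAIM (what is proved, stated in full; the proofs are below) =====
def Claim_equal_isKobieNumber : Prop := ∀ (n : Int), Dom_isKobieNumber n → Spec_isKobieNumber n (isKobieNumber n)

-- ===== LEMMAS AND PROOFS =====

-- Pure digit-recursion helpers (proof-only) mirroring what A's loop state computes.

-- was some processed digit 5 adjacent to a 1 (`last` = previously processed, lower digit)?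
def adjN (m : Nat) (last : Int) : Bool :=
  if h : 0 < m then
    ((m % 10 == 5) && ((m / 10 % 10 == 1) || (last == 1))) || adjN (m / 10) (m % 10)
  else false
termination_by m
decreasing_by exact Nat.div_lt_self h (by norm_num)

-- number of digits equal to 5
def c5N (m : Nat) : Nat :=
  if h : 0 < m then (if m % 10 = 5 then 1 else 0) + c5N (m / 10) else 0
termination_by m
decreasing_by exact Nat.div_lt_self h (by norm_num)

-- did some high part hit 112 or some low part hit 112?
def exN (m : Nat) (num : Int) (place : Nat) : Bool :=
  if h : 0 < m then
    (decide (m / 10 = 112) || (num + (m % 10 : Int) * 10 ^ place == 112))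
      || exN (m / 10) (num + (m % 10 : Int) * 10 ^ place) (place + 1)
  else false
termination_by m
decreasing_by exact Nat.div_lt_self h (by norm_num)

lemma mod_cast_pysem (m : Nat) : PySem.Int.mod (m : Int) 10 = ((m % 10 : Nat) : Int) := by
  rw [PySem.Int.mod, Int.fmod_eq_emod]; omega

lemma floordiv_cast_pysem (m : Nat) : PySem.Int.floordiv (m : Int) 10 = ((m / 10 : Nat) : Int) := by
  rw [PySem.Int.floordiv, Int.fdiv_eq_ediv]; omega

-- the loop invariant: A's loop, from any state, returns the three-part formula
lemma adj_step (m : Nat) (hm : 0 < m) (last : Int) (n2 : Bool) :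
    ((if (((m % 10 : Nat)) : Int) = 5 ∧ ((((m / 10 % 10 : Nat)) : Int) = 1 ∨ last = 1) then true else n2)
      || adjN (m / 10) ((m % 10 : Nat) : Int)) = (n2 || adjN m last) := by
  have e5 : ((((m % 10 : Nat)) : Int) = 5) ↔ m % 10 = 5 := by omega
  have e5' : ((m : Int) % 10 = 5) ↔ m % 10 = 5 := by omega
  have e1 : ((((m / 10 % 10 : Nat)) : Int) = 1) ↔ m / 10 % 10 = 1 := by omega
  have e1' : ((m : Int) / 10 % 10 = 1) ↔ m / 10 % 10 = 1 := by omega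
  conv_rhs => rw [adjN.eq_def]
  rw [dif_pos hm]
  by_cases h5 : m % 10 = 5 <;> by_cases h1 : m / 10 % 10 = 1 <;> by_cases hl : last = 1 <;>
    (simp [beq_eq_decide, e5, e5', e1, e1', h5, h1, hl,
      Bool.or_comm, Bool.or_left_comm]) <;>
    (try rw [show ((m : Int) % 10) = 5 from by omega])

lemma c5_step (m : Nat) (hm : 0 < m) (fc : Int) :
    ((if (((m % 10 : Nat)) : Int) = 5 then fc + 1 else fc) + ((c5N (m / 10) : Nat) : Int))
      = (fc + ((c5N m : Nat) : Int)) := by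
  have e5 : ((((m % 10 : Nat)) : Int) = 5) ↔ m % 10 = 5 := by omega
  have e5' : ((m : Int) % 10 = 5) ↔ m % 10 = 5 := by omega
  conv_rhs => rw [c5N.eq_def]
  rw [dif_pos hm]
  by_cases h5 : m % 10 = 5
  · simp only [e5, e5', h5, if_pos]
    push_cast
    ring
  · simp [e5, e5', h5]

lemma ex_step (m : Nat) (hm : 0 < m) (num : Int) (place : Nat) (i1 : Bool) :
    ((if (((m / 10 : Nat)) : Int) = 112 ∨ num + ((m % 10 : Nat) : Int) * 10 ^ place = 112 then true else i1)
      || exN (m / 10) (num + ((m % 10 : Nat) : Int) * 10 ^ place) (place + 1)) = (i1 || exN m num place) := by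
  have e112 : ((((m / 10 : Nat)) : Int) = 112) ↔ m / 10 = 112 := by omega
  have e112' : ((m : Int) / 10 = 112) ↔ m / 10 = 112 := by omega
  conv_rhs => rw [exN.eq_def]
  rw [dif_pos hm]
  by_cases h112 : m / 10 = 112 <;>
    by_cases hnum : num + ((m % 10 : Nat) : Int) * 10 ^ place = 112 <;>
    simp [beq_eq_decide, e112, e112', h112, hnum, Bool.or_assoc, Bool.or_comm, Bool.or_left_comm]

lemma isKobieLoop_inv (m : Nat) : ∀ (last num : Int) (place : Nat) (fc : Int) (i1 n2 : Bool),
    isKobieLoop (m : Int) last num place fc i1 n2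
      = ((n2 || adjN m last) && ((fc + (c5N m : Int)) == 1) && (i1 || exN m num place)) := by
  induction m using Nat.strong_induction_on with
  | _ m ih =>
    intro last num place fc i1 n2
    by_cases hm : 0 < m
    · have hpos : (0 : Int) < (m : Int) := by exact_mod_cast hm
      rw [isKobieLoop, dif_pos hpos]
      simp only [mod_cast_pysem, floordiv_cast_pysem]
      rw [ih (m / 10) (Nat.div_lt_self hm (by norm_num))]
      rw [adj_step m hm last n2, c5_step m hm fc, ex_step m hm num place i1]
    · have hm0 : m = 0 := by omega
      subst hm0
      rw [isKobieLoop]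
      simp [adjN, c5N, exN]


-- ---- generic list lemmas ----

lemma concat_eq_singleton_iff {α : Type} (xs : List α) (c y : α) :
    xs ++ [c] = [y] ↔ xs = [] ∧ c = y := by
  constructor
  · intro h
    have hl := congrArg List.length h
    simp at hl
    simp [hl] at h ⊢
    exact h
  · rintro ⟨rfl, rfl⟩
    rfl

lemma concat_eq_concat_iff {α : Type} (xs ys : List α) (c d : α) :
    xs ++ [c] = ys ++ [d] ↔ xs = ys ∧ c = d := by
  rw [← List.concat_eq_append, ← List.concat_eq_append, List.concat_inj]

lemma suffix_concat_concat {α : Type} (q xs : List α) (a b : α) :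
    (q ++ [a]) <:+ (xs ++ [b]) ↔ a = b ∧ q <:+ xs := by
  constructor
  · rintro ⟨t, ht⟩
    rw [← List.append_assoc] at ht
    rw [concat_eq_concat_iff] at ht
    exact ⟨ht.2, ⟨t, ht.1⟩⟩
  · rintro ⟨rfl, t, rfl⟩
    exact ⟨t, by simp⟩

lemma infix_concat_iff {α : Type} (t xs : List α) (c : α) :
    t <:+: xs ++ [c] ↔ t <:+: xs ∨ t <:+ (xs ++ [c]) := by
  constructor
  · rintro ⟨p, s, h⟩
    rcases List.eq_nil_or_concat s with rfl | ⟨s', d, rfl⟩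
    · right; exact ⟨p, by simpa using h⟩
    · left
      have h' : (p ++ t ++ s') ++ [d] = xs ++ [c] := by
        simpa [List.append_assoc] using h
      rw [concat_eq_concat_iff] at h'
      exact ⟨p, s', h'.1⟩
  · rintro (h | h)
    · exact h.trans ⟨[], [c], by simp⟩
    · exact h.isInfix

-- ---- digits of n, decimal character facts ----

lemma dc_inj (d e : Nat) (hd : d < 10) (he : e < 10) :
    Nat.digitChar d = Nat.digitChar e ↔ d = e := by
  interval_cases d <;> interval_cases e <;> simp [Nat.digitChar]

lemma td_base (m : Nat) (h : m < 10) : Nat.toDigits 10 m = [Nat.digitChar m] := by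
  rw [Nat.toDigits_eq_if (by norm_num)]
  simp [h, Nat.mod_eq_of_lt h]

lemma td_step (m : Nat) (h : 10 ≤ m) :
    Nat.toDigits 10 m = Nat.toDigits 10 (m / 10) ++ [Nat.digitChar (m % 10)] := by
  rw [Nat.toDigits_eq_if (by norm_num)]
  simp [Nat.not_lt.mpr h]

-- suffix of one digit
lemma suf1 (m : Nat) : 0 < m → ∀ d : Nat, d < 10 →
    ([Nat.digitChar d] <:+ Nat.toDigits 10 m ↔ m % 10 = d) := by
  intro hm d hd
  by_cases h10 : m < 10
  · rw [td_base m h10]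
    have h := suffix_concat_concat (α := Char) [] [] (Nat.digitChar d) (Nat.digitChar m)
    simp only [List.nil_append] at h
    rw [h]
    simp [dc_inj d m hd h10, Nat.mod_eq_of_lt h10, eq_comm]
  · rw [td_step m (Nat.le_of_not_lt h10)]
    have h := suffix_concat_concat (α := Char) [] (Nat.toDigits 10 (m / 10))
      (Nat.digitChar d) (Nat.digitChar (m % 10))
    simp only [List.nil_append] at h
    rw [h]
    simp [dc_inj d (m % 10) hd (Nat.mod_lt _ (by norm_num)), eq_comm]

-- suffix of two digits (leading digit nonzero)
lemma suf2 (m : Nat) : 0 < m → ∀ d e : Nat, 0 < d → d < 10 → e < 10 →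
    ([Nat.digitChar d, Nat.digitChar e] <:+ Nat.toDigits 10 m ↔ m % 100 = d * 10 + e) := by
  intro hm d e hd0 hd he
  by_cases h10 : m < 10
  · rw [td_base m h10]
    constructor
    · intro h
      have := h.length_le
      simp at this
    · intro h
      omega
  · have hq : 0 < m / 10 := Nat.div_pos (Nat.le_of_not_lt h10) (by norm_num)
    rw [td_step m (Nat.le_of_not_lt h10)]
    have h := suffix_concat_concat (α := Char) [Nat.digitChar d] (Nat.toDigits 10 (m / 10))
      (Nat.digitChar e) (Nat.digitChar (m % 10))
    simp only [List.singleton_append] at h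
    rw [h, dc_inj e (m % 10) he (Nat.mod_lt _ (by norm_num)),
      suf1 (m / 10) hq d hd]
    omega

-- suffix "112"
lemma suf112 (m : Nat) : 0 < m →
    (['1', '1', '2'] <:+ Nat.toDigits 10 m ↔ m % 1000 = 112) := by
  intro hm
  by_cases h10 : m < 10
  · rw [td_base m h10]
    constructor
    · intro h
      have := h.length_le
      simp at this
    · intro h
      omega
  · have hq : 0 < m / 10 := Nat.div_pos (Nat.le_of_not_lt h10) (by norm_num)
    rw [td_step m (Nat.le_of_not_lt h10)]
    have h := suffix_concat_concat (α := Char) ['1', '1'] (Nat.toDigits 10 (m / 10))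
      '2' (Nat.digitChar (m % 10))
    simp only [show (['1', '1'] ++ ['2'] : List Char) = ['1', '1', '2'] from rfl] at h
    rw [h]
    have e2 : ('2' = Nat.digitChar (m % 10)) ↔ m % 10 = 2 := by
      rw [show ('2' : Char) = Nat.digitChar 2 from rfl,
        dc_inj 2 (m % 10) (by norm_num) (Nat.mod_lt _ (by norm_num)), eq_comm]
    rw [e2, show (['1', '1'] : List Char) = [Nat.digitChar 1, Nat.digitChar 1] from rfl,
      suf2 (m / 10) hq 1 1 (by norm_num) (by norm_num) (by norm_num)]
    omega

-- toDigits determines the number: singletons and pairs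
lemma td_eq_one (m : Nat) : 0 < m → (Nat.toDigits 10 m = ['1'] ↔ m = 1) := by
  intro hm
  by_cases h10 : m < 10
  · rw [td_base m h10]
    simp only [List.cons.injEq, and_true]
    rw [show ('1' : Char) = Nat.digitChar 1 from rfl, dc_inj m 1 h10 (by norm_num)]
  · rw [td_step m (Nat.le_of_not_lt h10), concat_eq_singleton_iff]
    constructor
    · rintro ⟨h, -⟩
      exact absurd (congrArg List.length h) (by simp [Nat.length_toDigits_pos.ne'])
    · intro h
      omega

lemma td_eq_oneone (m : Nat) : 0 < m → (Nat.toDigits 10 m = ['1', '1'] ↔ m = 11) := by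
  intro hm
  by_cases h10 : m < 10
  · rw [td_base m h10]
    constructor
    · intro h
      exact absurd (congrArg List.length h) (by simp)
    · intro h
      omega
  · have hq : 0 < m / 10 := Nat.div_pos (Nat.le_of_not_lt h10) (by norm_num)
    rw [td_step m (Nat.le_of_not_lt h10),
      show (['1', '1'] : List Char) = ['1'] ++ ['1'] from rfl, concat_eq_concat_iff]
    rw [td_eq_one (m / 10) hq]
    rw [show ('1' : Char) = Nat.digitChar 1 from rfl,
      dc_inj (m % 10) 1 (Nat.mod_lt _ (by norm_num)) (by norm_num)]
    omega

-- prefix "112"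
lemma pre112 (m : Nat) : 0 < m →
    (['1', '1', '2'] <+: Nat.toDigits 10 m ↔ ∃ k, m / 10 ^ k = 112) := by
  induction m using Nat.strong_induction_on with
  | _ m ih =>
    intro hm
    by_cases h10 : m < 10
    · rw [td_base m h10]
      constructor
      · intro h
        have := h.length_le
        simp at this
      · rintro ⟨k, hk⟩
        have : m / 10 ^ k ≤ m := Nat.div_le_self _ _
        omega
    · have hq : 0 < m / 10 := Nat.div_pos (Nat.le_of_not_lt h10) (by norm_num)
      rw [td_step m (Nat.le_of_not_lt h10), List.prefix_concat_iff]
      have heq : (['1', '1', '2'] = Nat.toDigits 10 (m / 10) ++ [Nat.digitChar (m % 10)])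
          ↔ m = 112 := by
        rw [eq_comm, show (['1', '1', '2'] : List Char) = ['1', '1'] ++ ['2'] from rfl,
          concat_eq_concat_iff, td_eq_oneone (m / 10) hq,
          show ('2' : Char) = Nat.digitChar 2 from rfl,
          dc_inj (m % 10) 2 (Nat.mod_lt _ (by norm_num)) (by norm_num)]
        omega
      rw [heq, ih (m / 10) (Nat.div_lt_self hm (by norm_num)) hq]
      constructor
      · rintro (h | ⟨k, hk⟩)
        · exact ⟨0, by simpa using h⟩
        · refine ⟨k + 1, ?_⟩
          rw [pow_succ', ← Nat.div_div_eq_div_mul]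
          exact hk
      · rintro ⟨k, hk⟩
        cases k with
        | zero => exact Or.inl (by simpa using hk)
        | succ k =>
          rw [pow_succ', ← Nat.div_div_eq_div_mul] at hk
          exact Or.inr ⟨k, hk⟩

-- digit '5' count
lemma count5_td (m : Nat) : 0 < m → (Nat.toDigits 10 m).count '5' = c5N m := by
  induction m using Nat.strong_induction_on with
  | _ m ih =>
    intro hm
    rw [c5N.eq_def, dif_pos hm]
    have e5 : ∀ j : Nat, j < 10 → ((Nat.digitChar j == '5') = decide (j = 5)) := by
      intro j hj
      rw [show ('5' : Char) = Nat.digitChar 5 from rfl]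
      simp [beq_eq_decide, dc_inj j 5 hj (by norm_num)]
    by_cases h10 : m < 10
    · rw [td_base m h10]
      have hq : m / 10 = 0 := Nat.div_eq_of_lt h10
      rw [hq]
      rw [c5N.eq_def]
      simp only [List.count_singleton, e5 m h10, Nat.mod_eq_of_lt h10]
      by_cases h5 : m = 5 <;> simp [h5]
    · have hq : 0 < m / 10 := Nat.div_pos (Nat.le_of_not_lt h10) (by norm_num)
      rw [td_step m (Nat.le_of_not_lt h10), List.count_append,
        ih (m / 10) (Nat.div_lt_self hm (by norm_num)) hq]
      simp only [List.count_singleton, e5 (m % 10) (Nat.mod_lt _ (by norm_num))]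
      by_cases h5 : m % 10 = 5 <;> simp [h5] <;> omega

-- single-character substring count is character count
lemma count_go_single (c : Char) (l : List Char) : ∀ (fuel : Nat) (acc : Nat), l.length ≤ fuel →
    PySem.Chars.count.go [c] fuel l acc = acc + l.count c := by
  induction l with
  | nil =>
    intro fuel acc _
    cases fuel <;> rw [PySem.Chars.count.go] <;> simp
  | cons h t ihl =>
    intro fuel acc hlen
    cases fuel with
    | zero => simp at hlen
    | succ f =>
      rw [PySem.Chars.count.go]
      have hpre : List.isPrefixOf [c] (h :: t) = (c == h) := by
        simp [List.isPrefixOf]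
      rw [hpre]
      by_cases hc : c = h
      · subst hc
        simp only [BEq.rfl, if_pos]
        rw [List.length_cons] at hlen
        rw [show List.drop (List.length [c]) (c :: t) = t from rfl]
        rw [ihl _ (acc + 1) (by omega)]
        simp [List.count_cons]
        omega
      · rw [if_neg (by simp [beq_eq_decide, hc])]
        rw [List.length_cons] at hlen
        rw [ihl _ acc (by omega)]
        simp [List.count_cons, beq_eq_decide, hc, Ne.symm hc]

lemma count_single (l : List Char) (c : Char) : PySem.Chars.count l [c] = l.count c := by
  rw [PySem.Chars.count]
  simp only [List.isEmpty_cons, if_neg Bool.false_ne_true]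
  rw [count_go_single c l l.length 0 le_rfl]
  omega

-- adjacency: adjN is "15 or 51 occurs", plus the pending last-digit check
lemma adjN_td (m : Nat) : 0 < m → ∀ last : Int,
    adjN m last = (decide (['1','5'] <:+: Nat.toDigits 10 m)
      || decide (['5','1'] <:+: Nat.toDigits 10 m)
      || (decide (m % 10 = 5) && (last == 1))) := by
  induction m using Nat.strong_induction_on with
  | _ m ih =>
    intro hm last
    rw [adjN.eq_def, dif_pos hm]
    by_cases h10 : m < 10
    · have hq : m / 10 = 0 := Nat.div_eq_of_lt h10
      rw [hq, td_base m h10]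
      have inf1 : ¬ (['1','5'] <:+: [Nat.digitChar m]) := by
        intro h
        have := h.length_le
        simp at this
      have inf2 : ¬ (['5','1'] <:+: [Nat.digitChar m]) := by
        intro h
        have := h.length_le
        simp at this
      rw [adjN.eq_def]
      simp [inf1, inf2, Nat.mod_eq_of_lt h10, beq_eq_decide]
    · have hge : 10 ≤ m := Nat.le_of_not_lt h10
      have hq : 0 < m / 10 := Nat.div_pos hge (by norm_num)
      have i15 : (['1','5'] <:+: Nat.toDigits 10 m)
          ↔ (['1','5'] <:+: Nat.toDigits 10 (m / 10)) ∨ m % 100 = 15 := by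
        rw [td_step m hge, infix_concat_iff, ← td_step m hge,
          show (['1','5'] : List Char) = [Nat.digitChar 1, Nat.digitChar 5] from rfl,
          suf2 m hm 1 5 (by norm_num) (by norm_num) (by norm_num)]
      have i51 : (['5','1'] <:+: Nat.toDigits 10 m)
          ↔ (['5','1'] <:+: Nat.toDigits 10 (m / 10)) ∨ m % 100 = 51 := by
        rw [td_step m hge, infix_concat_iff, ← td_step m hge,
          show (['5','1'] : List Char) = [Nat.digitChar 5, Nat.digitChar 1] from rfl,
          suf2 m hm 5 1 (by norm_num) (by norm_num) (by norm_num)]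
      rw [ih (m / 10) (Nat.div_lt_self hm (by norm_num)) hq ((m : Int) % 10)]
      rw [Bool.eq_iff_iff]
      simp only [Bool.or_eq_true, Bool.and_eq_true, decide_eq_true_eq, beq_iff_eq, i15, i51]
      have hb : (((m : Int) % 10) = 1) ↔ m % 10 = 1 := by omega
      have h15 : (m % 100 = 15) ↔ (m % 10 = 5 ∧ m / 10 % 10 = 1) := by omega
      have h51 : (m % 100 = 51) ↔ (m % 10 = 1 ∧ m / 10 % 10 = 5) := by omega
      rw [hb, h15, h51]
      by_cases p1 : m % 10 = 5 <;> by_cases p2 : m / 10 % 10 = 1 <;> by_cases p3 : last = 1 <;>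
        by_cases p4 : m % 10 = 1 <;> by_cases p5 : m / 10 % 10 = 5 <;>
        simp_all [or_assoc, or_comm, or_left_comm]

-- the 112 test: exN from the initial state
lemma exN_inv (m : Nat) : ∀ (place : Nat) (M : Nat), m = M / 10 ^ place →
    (exN m ((M % 10 ^ place : Nat) : Int) place = true
      ↔ ∃ k, place < k ∧ 10 ^ (k - 1) ≤ M ∧ (M / 10 ^ k = 112 ∨ M % 10 ^ k = 112)) := by
  induction m using Nat.strong_induction_on with
  | _ m ih =>
    intro place M hM
    by_cases hm : 0 < m
    · rw [exN.eq_def, dif_pos hm]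
      have hdiv : m / 10 = M / 10 ^ (place + 1) := by
        rw [hM, Nat.div_div_eq_div_mul, ← pow_succ]
      rw [show ((m : Int) % 10) = ((m % 10 : Nat) : Int) from by omega]
      have hnum : ((M % 10 ^ place : Nat) : Int) + ((m % 10 : Nat) : Int) * 10 ^ place
          = ((M % 10 ^ (place + 1) : Nat) : Int) := by
        have h1 : M % 10 ^ (place + 1) = M % 10 ^ place + 10 ^ place * (M / 10 ^ place % 10) := by
          rw [pow_succ]
          exact Nat.mod_mul
        rw [h1, hM]
        push_cast
        ring
      rw [hnum]
      simp only [Bool.or_eq_true, beq_iff_eq, decide_eq_true_eq]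
      rw [ih (m / 10) (Nat.div_lt_self hm (by norm_num)) (place + 1) M hdiv]
      have hple : 10 ^ place ≤ M := by
        rw [hM] at hm
        exact (Nat.div_pos_iff.mp hm).2
      constructor
      · rintro ((h112 | hnum112) | ⟨k, hk, hle, hc⟩)
        · exact ⟨place + 1, by omega, by simpa using hple, Or.inl (by rw [← hdiv]; exact h112)⟩
        · exact ⟨place + 1, by omega, by simpa using hple, Or.inr (by exact_mod_cast hnum112)⟩
        · exact ⟨k, by omega, hle, hc⟩
      · rintro ⟨k, hk, hle, hc⟩
        rcases Nat.lt_or_ge (place + 1) k with hk2 | hk2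
        · exact Or.inr ⟨k, hk2, hle, hc⟩
        · have hkk : k = place + 1 := by omega
          subst hkk
          rcases hc with hc | hc
          · exact Or.inl (Or.inl (by rw [hdiv]; exact hc))
          · exact Or.inl (Or.inr (by exact_mod_cast congrArg (Nat.cast : Nat → Int) hc))
    · have hm0 : m = 0 := by omega
      subst hm0
      rw [exN.eq_def, dif_neg (by omega : ¬ ((0:Nat) < 0))]
      constructor
      · intro h
        exact absurd h (by simp)
      · rintro ⟨k, hk, hle, -⟩
        have hlt : M < 10 ^ place := by
          have h0 := Nat.div_eq_zero_iff.mp hM.symm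
          rcases h0 with h | h
          · exact absurd h (pow_ne_zero place (by norm_num))
          · exact h
        have : 10 ^ place ≤ 10 ^ (k - 1) := Nat.pow_le_pow_right (by norm_num) (by omega)
        omega

lemma exN_char (m : Nat) (hm : 0 < m) :
    (exN m 0 0 = true ↔ (∃ k, m / 10 ^ k = 112) ∨ m % 1000 = 112) := by
  have h := exN_inv m 0 m (by simp)
  simp only [pow_zero, Nat.mod_one, Nat.cast_zero] at h
  rw [h]
  constructor
  · rintro ⟨k, hk0, hkle, hc | hc⟩
    · exact Or.inl ⟨k, hc⟩
    · have hk3 : 3 ≤ k := by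
        by_contra hk3
        interval_cases k <;> omega
      refine Or.inr ?_
      have hdvd : (1000 : Nat) ∣ 10 ^ k := by
        calc (1000 : Nat) = 10 ^ 3 := by norm_num
        _ ∣ 10 ^ k := pow_dvd_pow 10 hk3
      calc m % 1000 = m % 10 ^ k % 1000 := (Nat.mod_mod_of_dvd m hdvd).symm
      _ = 112 := by rw [hc]
  · rintro (⟨k, hk⟩ | h1000)
    · cases k with
      | zero =>
        simp only [pow_zero, Nat.div_one] at hk
        exact ⟨3, by norm_num, by norm_num; omega, Or.inr (by norm_num; omega)⟩
      | succ k =>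
        have h10k : 10 ^ (k + 1) ≤ m := by
          have : 0 < m / 10 ^ (k + 1) := by omega
          exact (Nat.div_pos_iff.mp this).2
        have : 10 ^ k ≤ 10 ^ (k + 1) := Nat.pow_le_pow_right (by norm_num) (by omega)
        exact ⟨k + 1, by omega, by simpa using le_trans this h10k, Or.inl hk⟩
    · exact ⟨3, by norm_num, by norm_num; omega, Or.inr (by norm_num; omega)⟩

-- ===== VERDICT (by name: the statement is the Claim_ definition above) =====
theorem isKobieNumber_spec : Claim_equal_isKobieNumber := by
  intro n _
  unfold Spec_isKobieNumber
  by_cases hn : n ≤ 0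
  · rw [isKobieNumber, isKobieLoop, dif_neg (by omega : ¬ (0:Int) < n),
      isKobieNumber_alt, if_pos hn]
    simp
  · have hm : 0 < n.toNat := by omega
    have hcast : ((n.toNat : Nat) : Int) = n := Int.toNat_of_nonneg (by omega)
    have hs : (PySem.Int.toStr n).toList = Nat.toDigits 10 n.toNat := by
      rw [PySem.Int.toList_toStr, PySem.Int.toChars, if_neg (by omega : ¬ n < 0)]
    have b15 : PySem.Str.isIn "15" (PySem.Int.toStr n)
        = decide (['1','5'] <:+: Nat.toDigits 10 n.toNat) := by
      rw [Bool.eq_iff_iff, PySem.Str.isIn_iff_infix, decide_eq_true_eq,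
        show ("15" : String).toList = ['1','5'] from rfl, hs]
    have b51 : PySem.Str.isIn "51" (PySem.Int.toStr n)
        = decide (['5','1'] <:+: Nat.toDigits 10 n.toNat) := by
      rw [Bool.eq_iff_iff, PySem.Str.isIn_iff_infix, decide_eq_true_eq,
        show ("51" : String).toList = ['5','1'] from rfl, hs]
    have bcnt : PySem.Str.count (PySem.Int.toStr n) "5" = c5N n.toNat := by
      rw [PySem.Str.count, hs, show ("5" : String).toList = ['5'] from rfl,
        count_single, count5_td n.toNat hm]
    have bpre : PySem.Str.startswith (PySem.Int.toStr n) "112"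
        = decide (['1','1','2'] <+: Nat.toDigits 10 n.toNat) := by
      rw [PySem.Str.startswith_eq, Bool.eq_iff_iff, PySem.Chars.startswith_iff,
        decide_eq_true_eq, hs, show ("112" : String).toList = ['1','1','2'] from rfl]
    have bsuf : PySem.Str.endswith (PySem.Int.toStr n) "112"
        = decide (['1','1','2'] <:+ Nat.toDigits 10 n.toNat) := by
      rw [PySem.Str.endswith_eq, Bool.eq_iff_iff, PySem.Chars.endswith_iff,
        decide_eq_true_eq, hs, show ("112" : String).toList = ['1','1','2'] from rfl]
    have hex : exN n.toNat 0 0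
        = decide ((['1','1','2'] <+: Nat.toDigits 10 n.toNat)
            ∨ (['1','1','2'] <:+ Nat.toDigits 10 n.toNat)) := by
      rw [Bool.eq_iff_iff, exN_char n.toNat hm, decide_eq_true_eq,
        pre112 n.toNat hm, suf112 n.toNat hm]
    have hcntA : (((c5N n.toNat : Nat) : Int) == 1) = decide (c5N n.toNat = 1) := by
      rw [Bool.eq_iff_iff]
      simp only [beq_iff_eq, decide_eq_true_eq]
      omega
    rw [isKobieNumber, ← hcast, isKobieLoop_inv n.toNat 0 0 0 0 false false,
      isKobieNumber_alt, if_neg (by omega : ¬ ((n.toNat : Nat) : Int) ≤ 0)]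
    rw [hcast]
    simp only [Bool.false_or, zero_add, b15, b51, bcnt, bpre, bsuf, hex, hcntA,
      adjN_td n.toNat hm 0]
    simp [beq_eq_decide]
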